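-- pv_equiv track=rewrite | github.com/palaciossruben/acerto | testing_webpage/learn_to_predict_match.py | cutoff_transform
-- ===== SOURCE A (Python) =====
-- def get_value(idx, cutoffs):
--
--     # beyond last value
--     if idx > len(cutoffs) - 1:
--         return 10000000000
--     else:
--         return cutoffs[idx]
--
-- def cutoff_transform(cutoffs, predicted):
--
--     new_prediction = []
--     for p in predicted:
--         for idx, c in enumerate(cutoffs):
--             if c < p < get_value(idx+1, cutoffs):
--                 new_prediction.append(idx+1)
--                 break
--
--             if idx == 0 and p < c:
--                 new_prediction.append(0)
--                 break
--
--     return new_prediction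
-- ===== SOURCE B (Python) =====
-- BIG = 10000000000
--
-- def cutoff_transform(cutoffs, predicted):
--     if not cutoffs:
--         return []
--     first = cutoffs[0]
--     assigned = {}
--     pending = []
--     for i, p in enumerate(predicted):
--         if p < first:
--             assigned[i] = 0
--         else:
--             pending.append((i, p))
--     for idx, lo in enumerate(cutoffs):
--         hi = cutoffs[idx + 1] if idx + 1 < len(cutoffs) else BIG
--         still = []
--         for i, p in pending:
--             if lo < p < hi:
--                 assigned[i] = idx + 1
--             else:
--                 still.append((i, p))
--         pending = still
--     return [assigned[i] for i in range(len(predicted)) if i in assigned]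
-- ===== Notes on version B (the rewrite author's own statement) =====
-- stated objective: alternative
-- what changed: B inverts the loop nesting: one pass over predicted splits values into below-first-cutoff (bin 0) and pending, then a single sweep over the cutoff intervals classifies and removes the still-pending predictions at each interval, and the output is rebuilt in original position order from a position->bin map; A instead rescans the whole cutoff list (with get_value calls) for every predicted value.
import Mathlib
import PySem

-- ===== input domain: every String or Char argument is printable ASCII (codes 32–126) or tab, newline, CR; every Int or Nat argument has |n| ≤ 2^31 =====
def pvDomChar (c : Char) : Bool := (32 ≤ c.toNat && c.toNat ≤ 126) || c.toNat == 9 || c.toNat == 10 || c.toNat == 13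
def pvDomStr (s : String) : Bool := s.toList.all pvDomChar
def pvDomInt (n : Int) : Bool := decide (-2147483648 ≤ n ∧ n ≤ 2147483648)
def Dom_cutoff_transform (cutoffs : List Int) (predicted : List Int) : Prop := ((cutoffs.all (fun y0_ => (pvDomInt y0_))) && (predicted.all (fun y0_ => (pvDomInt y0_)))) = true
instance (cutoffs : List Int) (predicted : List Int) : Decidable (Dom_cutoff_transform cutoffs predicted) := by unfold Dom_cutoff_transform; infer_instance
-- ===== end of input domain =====

-- B inverts the loop nesting (one sweep over cutoff intervals classifying the still-pending
-- predictions, output rebuilt from a position->bin map); return values proved equal on all inputs.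

-- ===== PORT A =====
-- get_value(idx, cutoffs); every call site reaching the else-branch has the index in range, so .getD 0 is unreachable
def getValue (idx : Int) (cutoffs : List Int) : Int :=
  if idx > (cutoffs.length : Int) - 1 then 10000000000
  else (PySem.List.pyGet? cutoffs idx).getD 0

-- the inner 'for idx, c in enumerate(cutoffs)' loop with its two break-appends (none = no append)
def innerA (cutoffs : List Int) (p : Int) (idx : Nat) (rest : List Int) : Option Int :=
  match rest with
  | [] => none
  | c :: rest' =>
    if c < p ∧ p < getValue ((idx : Int) + 1) cutoffs then some ((idx : Int) + 1)
    else if idx = 0 ∧ p < c then some 0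
    else innerA cutoffs p (idx + 1) rest'

def cutoff_transform (cutoffs : List Int) (predicted : List Int) : List Int :=
  predicted.foldl (fun acc p =>
    match innerA cutoffs p 0 cutoffs with
    | some v => acc ++ [v]
    | none => acc) []

-- ===== PORT B =====
-- 'cutoffs[idx + 1] if idx + 1 < len(cutoffs) else BIG'
def hiOf (cutoffs : List Int) (idx : Int) : Int :=
  if idx + 1 < (cutoffs.length : Int) then (PySem.List.pyGet? cutoffs (idx + 1)).getD 0
  else 10000000000

def cutoff_transform_alt (cutoffs : List Int) (predicted : List Int) : List Int :=
  match cutoffs with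
  | [] => []
  | first :: _ =>
    -- first pass over predicted: bin 0 for p < first, the rest pending as (position, value)
    let s0 := (PySem.List.enumerate predicted).foldl
      (fun (s : PySem.Dict Int Int × List (Int × Int)) ip =>
        if ip.2 < first then (s.1.insert ip.1 0, s.2)
        else (s.1, s.2 ++ [ip])) (PySem.Dict.empty, [])
    -- sweep over the cutoff intervals, classifying and dropping pending entries
    let s1 := (PySem.List.enumerate cutoffs).foldl
      (fun (s : PySem.Dict Int Int × List (Int × Int)) il =>
        let hi := hiOf cutoffs il.1
        s.2.foldl (fun (t : PySem.Dict Int Int × List (Int × Int)) ip =>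
          if il.2 < ip.2 ∧ ip.2 < hi then (t.1.insert ip.1 (il.1 + 1), t.2)
          else (t.1, t.2 ++ [ip])) (s.1, [])) s0
    -- rebuild the output in position order
    (PySem.List.pyRange 0 (predicted.length : Int) 1).foldl (fun acc i =>
      match s1.1.get? i with
      | some v => acc ++ [v]
      | none => acc) []

-- ===== PRECONDITION & SPEC =====
def Spec_cutoff_transform (cutoffs : List Int) (predicted : List Int) (out : List Int) : Prop := out = cutoff_transform_alt cutoffs predicted
instance (cutoffs : List Int) (predicted : List Int) (out : List Int) : Decidable (Spec_cutoff_transform cutoffs predicted out) := by unfold Spec_cutoff_transform; infer_instance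

-- ===== CLAIM =====
def Claim_equal_cutoff_transform : Prop := ∀ (cutoffs : List Int) (predicted : List Int), Dom_cutoff_transform cutoffs predicted → Spec_cutoff_transform cutoffs predicted (cutoff_transform cutoffs predicted)

-- ===== LEMMAS AND PROOFS =====

-- proof-side classification function both ports are reduced to
def scanB (p : Int) (idx : Nat) (pairs : List (Int × Int)) : Option Int :=
  match pairs with
  | [] => none
  | (lo, hi) :: rest =>
    if lo < p ∧ p < hi then some ((idx : Int) + 1) else scanB p (idx + 1) rest

def classifyB (pairs : List (Int × Int)) (first : Int) (p : Int) : Option Int :=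
  if p < first then some 0 else scanB p 0 pairs

lemma scanB_cons (p lo hi : Int) (idx : Nat) (rest : List (Int × Int)) :
    scanB p idx ((lo, hi) :: rest)
      = if lo < p ∧ p < hi then some ((idx : Int) + 1) else scanB p (idx + 1) rest := rfl

lemma getValue_succ (cutoffs : List Int) (idx : Nat) (c : Int) (rest' : List Int)
    (h : cutoffs.drop idx = c :: rest') :
    getValue ((idx : Int) + 1) cutoffs = (rest' ++ [10000000000]).headD 0 := by
  have hlen : idx < cutoffs.length := by
    by_contra hc
    simp [List.drop_eq_nil_of_le (Nat.le_of_not_lt hc)] at h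
  have hdrop : cutoffs.drop (idx + 1) = rest' := by
    have := congrArg (List.drop 1) h
    simpa [List.drop_drop, Nat.add_comm] using this
  cases rest' with
  | nil =>
    have hle : cutoffs.length <= idx + 1 := by
      by_contra hc
      have := List.drop_eq_nil_iff.mp hdrop
      omega
    simp [getValue]
    omega
  | cons r t =>
    have hlt : idx + 1 < cutoffs.length := by
      have : (cutoffs.drop (idx+1)).length = cutoffs.length - (idx+1) := List.length_drop ..
      rw [hdrop] at this
      simp at this
      omega
    have hcast : (idx : Int) + 1 = ((idx + 1 : Nat) : Int) := by push_cast; ring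
    have hget : cutoffs[(idx+1)]? = some r := by
      have : (cutoffs.drop (idx+1))[0]? = cutoffs[(idx+1)+0]? := List.getElem?_drop
      rw [hdrop] at this
      simpa using this.symm
    rw [getValue, hcast, if_neg (by push_cast; omega)]
    rw [PySem.List.pyGet?_natCast, hget]
    rfl

lemma inner_eq_scan (cutoffs : List Int) (p : Int) :
    ∀ (rest : List Int) (idx : Nat), 1 <= idx → cutoffs.drop idx = rest →
    innerA cutoffs p idx rest = scanB p idx (rest.zip (rest.drop 1 ++ [10000000000])) := by
  intro rest
  induction rest with
  | nil => intro idx _ _; simp [innerA, scanB]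
  | cons c rest' ih =>
    intro idx hidx hdrop
    have hdrop' : cutoffs.drop (idx + 1) = rest' := by
      have := congrArg (List.drop 1) hdrop
      simpa [List.drop_drop, Nat.add_comm] using this
    have hgv := getValue_succ cutoffs idx c rest' hdrop
    have hne : ¬ (idx = 0 ∧ p < c) := by rintro ⟨h0, -⟩; omega
    rw [innerA, if_neg hne]
    have hzip : (c :: rest').zip ((c :: rest').drop 1 ++ [(10000000000:Int)])
        = (c, (rest' ++ [10000000000]).headD 0) :: rest'.zip (rest'.drop 1 ++ [10000000000]) := by
      cases rest' <;> simp
    rw [hzip, scanB]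
    rw [hgv]
    by_cases hc : c < p ∧ p < (rest' ++ [10000000000]).headD 0
    · rw [if_pos hc, if_pos hc]
    · rw [if_neg hc, if_neg hc]
      exact ih (idx + 1) (by omega) hdrop'

lemma inner_eq_classify (first : Int) (restC : List Int) (p : Int) :
    innerA (first :: restC) p 0 (first :: restC)
      = classifyB ((first :: restC).zip (restC ++ [10000000000])) first p := by
  have hgv := getValue_succ (first :: restC) 0 first restC (by simp)
  have hzip : (first :: restC).zip (restC ++ [(10000000000:Int)])
      = (first, (restC ++ [10000000000]).headD 0) :: restC.zip (restC.drop 1 ++ [10000000000]) := by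
    cases restC <;> simp
  rw [innerA, classifyB, hzip, scanB]
  have hscan := inner_eq_scan (first :: restC) p restC 1 (by omega) (by simp)
  push_cast at hgv ⊢
  rw [hgv]
  norm_num
  by_cases hp : p < first
  · have hn : ¬ (first < p ∧ p < restC.head?.getD 10000000000) := by
      rintro ⟨h1, -⟩; omega
    rw [if_neg hn, if_pos hp, if_neg hn, if_pos hp]
  · simp only [if_neg hp]
    by_cases hc : first < p ∧ p < restC.head?.getD 10000000000
    · rw [if_pos hc, if_pos hc]
    · rw [if_neg hc, if_neg hc]
      simpa using hscan

-- ---- B-side loop characterizations ----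

lemma lookup_cons_self (j q : Int) (l : List (Int × Int)) :
    List.lookup j ((j, q) :: l) = some q := by
  simp [List.lookup]

lemma lookup_cons_ne {i j : Int} (q : Int) (l : List (Int × Int)) (h : i ≠ j) :
    List.lookup i ((j, q) :: l) = List.lookup i l := by
  simp [List.lookup, beq_eq_false_iff_ne.mpr h]

lemma lookup_none {l : List (Int × Int)} {i : Int} (h : i ∉ l.map Prod.fst) :
    List.lookup i l = none := by
  induction l with
  | nil => rfl
  | cons a l ih =>
    simp only [List.map_cons, List.mem_cons] at h
    push_neg at h
    rw [show a = (a.1, a.2) from rfl, lookup_cons_ne _ _ h.1]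
    exact ih h.2

lemma lookup_filter (P : Int × Int → Bool) :
    ∀ (l : List (Int × Int)), (l.map Prod.fst).Nodup → ∀ (i : Int),
    List.lookup i (l.filter P)
      = match List.lookup i l with
        | some p => if P (i, p) then some p else none
        | none => none := by
  intro l
  induction l with
  | nil => intro _ i; rfl
  | cons a l ih =>
    intro hnd i
    obtain ⟨j, q⟩ := a
    simp only [List.map_cons, List.nodup_cons] at hnd
    by_cases hij : i = j
    · subst hij
      by_cases hP : P (i, q)
      · simp [List.filter_cons, hP, lookup_cons_self]
      · have hnl : List.lookup i (l.filter P) = none := by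
          apply lookup_none
          intro hm
          exact hnd.1 ((List.Sublist.map Prod.fst List.filter_sublist).subset hm)
        simp [List.filter_cons, hP, lookup_cons_self, hnl]
    · by_cases hP : P (j, q)
      · rw [List.filter_cons, if_pos hP, lookup_cons_ne _ _ hij, lookup_cons_ne _ _ hij, ih hnd.2 i]
      · rw [List.filter_cons, if_neg hP, lookup_cons_ne _ _ hij, ih hnd.2 i]

lemma lookup_enumerate (xs : List Int) : ∀ (s i : Int),
    List.lookup i (PySem.List.enumerate xs s)
      = if s ≤ i ∧ i < s + xs.length then xs[(i - s).toNat]? else none := by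
  induction xs with
  | nil =>
    intro s i
    rw [if_neg (by simp)]
    rfl
  | cons x xs ih =>
    intro s i
    rw [PySem.List.enumerate_cons, List.lookup]
    by_cases hij : i = s
    · subst hij
      simp
    · rw [show (i == s) = false from beq_eq_false_iff_ne.mpr hij, ih (s + 1) i]
      by_cases hc : s + 1 ≤ i ∧ i < s + 1 + xs.length
      · rw [if_pos hc, if_pos (by constructor <;> [omega; (simp; omega)])]
        have : (i - s).toNat = (i - (s + 1)).toNat + 1 := by omega
        rw [this, List.getElem?_cons_succ]
      · rw [if_neg hc, if_neg (by simp; omega)]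

-- the inner 'for i, p in pending' fold of B's interval sweep
lemma pend_fold (lo hi v : Int) :
    ∀ (l : List (Int × Int)) (t0 : PySem.Dict Int Int × List (Int × Int)),
    (l.map Prod.fst).Nodup →
    (l.foldl (fun (t : PySem.Dict Int Int × List (Int × Int)) ip =>
        if lo < ip.2 ∧ ip.2 < hi then (t.1.insert ip.1 v, t.2) else (t.1, t.2 ++ [ip])) t0).2
      = t0.2 ++ l.filter (fun ip => !(decide (lo < ip.2 ∧ ip.2 < hi)))
    ∧ ∀ i, (l.foldl (fun (t : PySem.Dict Int Int × List (Int × Int)) ip =>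
        if lo < ip.2 ∧ ip.2 < hi then (t.1.insert ip.1 v, t.2) else (t.1, t.2 ++ [ip])) t0).1.get? i
      = match List.lookup i l with
        | some p => if lo < p ∧ p < hi then some v else t0.1.get? i
        | none => t0.1.get? i := by
  intro l
  induction l with
  | nil => intro t0 _; exact ⟨by simp, fun i => rfl⟩
  | cons a l ih =>
    intro t0 hnd
    obtain ⟨j, q⟩ := a
    simp only [List.map_cons, List.nodup_cons] at hnd
    by_cases hm : lo < q ∧ q < hi
    · obtain ⟨h2, hg⟩ := ih (t0.1.insert j v, t0.2) hnd.2
      constructor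
      · simpa [List.foldl_cons, hm, List.filter_cons] using h2
      · intro i
        simp only [List.foldl_cons, if_pos hm]
        rw [hg i]
        by_cases hij : i = j
        · subst hij
          rw [lookup_none hnd.1]
          simp [lookup_cons_self, PySem.Dict.get?_insert_self, hm]
        · rw [lookup_cons_ne _ _ hij]
          simp [PySem.Dict.get?_insert, hij]
    · obtain ⟨h2, hg⟩ := ih (t0.1, t0.2 ++ [(j, q)]) hnd.2
      constructor
      · simp only [List.foldl_cons, if_neg hm]
        rw [h2, List.filter_cons, if_pos (by simp [hm])]
        simp
      · intro i
        simp only [List.foldl_cons, if_neg hm]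
        rw [hg i]
        by_cases hij : i = j
        · subst hij
          rw [lookup_none hnd.1]
          simp [lookup_cons_self, hm]
        · rw [lookup_cons_ne _ _ hij]

-- the first pass over enumerate(predicted)
lemma phase1_fold (first : Int) :
    ∀ (l : List (Int × Int)) (t0 : PySem.Dict Int Int × List (Int × Int)),
    (l.map Prod.fst).Nodup →
    (l.foldl (fun (s : PySem.Dict Int Int × List (Int × Int)) ip =>
        if ip.2 < first then (s.1.insert ip.1 0, s.2) else (s.1, s.2 ++ [ip])) t0).2
      = t0.2 ++ l.filter (fun ip => !(decide (ip.2 < first)))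
    ∧ ∀ i, (l.foldl (fun (s : PySem.Dict Int Int × List (Int × Int)) ip =>
        if ip.2 < first then (s.1.insert ip.1 0, s.2) else (s.1, s.2 ++ [ip])) t0).1.get? i
      = match List.lookup i l with
        | some p => if p < first then some 0 else t0.1.get? i
        | none => t0.1.get? i := by
  intro l
  induction l with
  | nil => intro t0 _; exact ⟨by simp, fun i => rfl⟩
  | cons a l ih =>
    intro t0 hnd
    obtain ⟨j, q⟩ := a
    simp only [List.map_cons, List.nodup_cons] at hnd
    by_cases hm : q < first
    · obtain ⟨h2, hg⟩ := ih (t0.1.insert j 0, t0.2) hnd.2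
      constructor
      · simpa [List.foldl_cons, hm, List.filter_cons] using h2
      · intro i
        simp only [List.foldl_cons, if_pos hm]
        rw [hg i]
        by_cases hij : i = j
        · subst hij
          rw [lookup_none hnd.1]
          simp [lookup_cons_self, PySem.Dict.get?_insert_self, hm]
        · rw [lookup_cons_ne _ _ hij]
          simp [PySem.Dict.get?_insert, hij]
    · obtain ⟨h2, hg⟩ := ih (t0.1, t0.2 ++ [(j, q)]) hnd.2
      constructor
      · simpa [List.foldl_cons, hm, List.filter_cons] using h2
      · intro i
        simp only [List.foldl_cons, if_neg hm]
        rw [hg i]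
        by_cases hij : i = j
        · subst hij
          rw [lookup_none hnd.1]
          simp [lookup_cons_self, hm]
        · rw [lookup_cons_ne _ _ hij]

lemma hiOf_eq_getValue (cutoffs : List Int) (idx : Int) :
    hiOf cutoffs idx = getValue (idx + 1) cutoffs := by
  unfold hiOf getValue
  by_cases h : idx + 1 < (cutoffs.length : Int)
  · rw [if_pos h, if_neg (by omega)]
  · rw [if_neg h, if_pos (by omega)]

-- the interval sweep, by induction on the cutoff suffix
lemma phase2_fold (cutoffs : List Int) :
    ∀ (suffix : List Int) (idx : Nat) (s0 : PySem.Dict Int Int × List (Int × Int)),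
    cutoffs.drop idx = suffix → (s0.2.map Prod.fst).Nodup →
    ∀ i, ((PySem.List.enumerate suffix (idx : Int)).foldl
        (fun (s : PySem.Dict Int Int × List (Int × Int)) il =>
          let hi := hiOf cutoffs il.1
          s.2.foldl (fun (t : PySem.Dict Int Int × List (Int × Int)) ip =>
            if il.2 < ip.2 ∧ ip.2 < hi then (t.1.insert ip.1 (il.1 + 1), t.2)
            else (t.1, t.2 ++ [ip])) (s.1, [])) s0).1.get? i
      = match List.lookup i s0.2 with
        | some p =>
          match scanB p idx (suffix.zip (suffix.drop 1 ++ [10000000000])) with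
          | some v => some v
          | none => s0.1.get? i
        | none => s0.1.get? i := by
  intro suffix
  induction suffix with
  | nil =>
    intro idx s0 _ _ i
    rw [PySem.List.enumerate_nil]
    simp only [List.foldl_nil, List.zip_nil_left, scanB]
    cases List.lookup i s0.2 <;> rfl
  | cons lo rest' ih =>
    intro idx s0 hdrop hnd i
    have hdrop' : cutoffs.drop (idx + 1) = rest' := by
      have := congrArg (List.drop 1) hdrop
      simpa [List.drop_drop, Nat.add_comm] using this
    have hhi : hiOf cutoffs (idx : Int) = (rest' ++ [10000000000]).headD 0 := by
      rw [hiOf_eq_getValue]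
      exact getValue_succ cutoffs idx lo rest' hdrop
    rw [PySem.List.enumerate_cons, List.foldl_cons]
    obtain ⟨h2, hg⟩ := pend_fold lo (hiOf cutoffs (idx : Int)) ((idx : Int) + 1) s0.2 (s0.1, []) hnd
    have hcast : (idx : Int) + 1 = ((idx + 1 : Nat) : Int) := by push_cast; ring
    have hnd' : ((s0.2.filter (fun ip => !(decide (lo < ip.2 ∧ ip.2 < hiOf cutoffs (idx : Int))))).map Prod.fst).Nodup := by
      exact List.Nodup.sublist (List.Sublist.map Prod.fst List.filter_sublist) hnd
    have hrec := ih (idx + 1)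
      ((s0.2.foldl (fun (t : PySem.Dict Int Int × List (Int × Int)) ip =>
          if lo < ip.2 ∧ ip.2 < hiOf cutoffs (idx : Int) then (t.1.insert ip.1 ((idx : Int) + 1), t.2)
          else (t.1, t.2 ++ [ip])) (s0.1, [])))
      hdrop' (by rw [h2]; simpa using hnd') i
    rw [← hcast] at hrec
    rw [hrec, h2]
    simp only [List.nil_append]
    rw [lookup_filter _ s0.2 hnd i, hg i]
    have hzip : (lo :: rest').zip ((lo :: rest').drop 1 ++ [(10000000000 : Int)])
        = (lo, (rest' ++ [10000000000]).headD 0) :: rest'.zip (rest'.drop 1 ++ [10000000000]) := by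
      cases rest' <;> simp
    rw [hzip]
    cases hl : List.lookup i s0.2 with
    | none => simp
    | some p =>
      by_cases hm : lo < p ∧ p < (rest' ++ [10000000000]).headD 0
      · have hm' : lo < p ∧ p < hiOf cutoffs (idx : Int) := by rw [hhi]; exact hm
        have hh : p < rest'.head?.getD 10000000000 := by
          cases rest' <;> simpa using hm.2
        simp [scanB_cons, hm.1, hm', hh]
      · have hm' : ¬(lo < p ∧ p < hiOf cutoffs (idx : Int)) := by rw [hhi]; exact hm
        have hh : ¬(lo < p ∧ p < rest'.head?.getD 10000000000) := by
          cases rest' <;> simpa using hm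
        simp only [scanB_cons]
        simp [hm']
        rw [if_neg hh]

-- fold that appends the some-values = filterMap
lemma foldl_opt_append {α : Type} (q : α → Option Int) :
    ∀ (l : List α) (acc : List Int),
    l.foldl (fun acc x => match q x with | some v => acc ++ [v] | none => acc) acc
      = acc ++ l.filterMap q := by
  intro l
  induction l with
  | nil => intro acc; simp
  | cons x l ih =>
    intro acc
    rw [List.foldl_cons, List.filterMap_cons]
    cases hq : q x with
    | none => rw [ih acc]
    | some v => rw [ih (acc ++ [v])]; simp

lemma a_eq (cutoffs predicted : List Int) :
    cutoff_transform cutoffs predicted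
      = predicted.filterMap (fun p => innerA cutoffs p 0 cutoffs) := by
  unfold cutoff_transform
  rw [foldl_opt_append (fun p => innerA cutoffs p 0 cutoffs)]
  rfl

lemma match_opt_id (o : Option Int) :
    (match o with | some v => some v | none => none) = o := by
  cases o <;> rfl

lemma alt_eq (first : Int) (restC : List Int) (predicted : List Int) :
    cutoff_transform_alt (first :: restC) predicted
      = predicted.filterMap (classifyB ((first :: restC).zip (restC ++ [10000000000])) first) := by
  have hnodup_e : ((PySem.List.enumerate predicted 0).map Prod.fst).Nodup := by
    have h := PySem.List.map_fst_enumerate predicted 0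
    rw [show (fun x : Int × Int => x.1) = (Prod.fst : Int × Int → Int) from rfl] at h
    rw [h]
    exact PySem.List.nodup_pyRange_one 0 (0 + predicted.length)
  obtain ⟨hp2, hp1⟩ := phase1_fold first (PySem.List.enumerate predicted 0) (PySem.Dict.empty, []) hnodup_e
  simp only [List.nil_append] at hp2
  have hnd0 : ((((PySem.List.enumerate predicted 0).foldl
        (fun (s : PySem.Dict Int Int × List (Int × Int)) ip =>
          if ip.2 < first then (s.1.insert ip.1 0, s.2) else (s.1, s.2 ++ [ip]))
        (PySem.Dict.empty, [])).2).map Prod.fst).Nodup := by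
    rw [hp2]
    exact List.Nodup.sublist (List.Sublist.map Prod.fst List.filter_sublist) hnodup_e
  have hph2 := phase2_fold (first :: restC) (first :: restC) 0 ((PySem.List.enumerate predicted 0).foldl
        (fun (s : PySem.Dict Int Int × List (Int × Int)) ip =>
          if ip.2 < first then (s.1.insert ip.1 0, s.2) else (s.1, s.2 ++ [ip]))
        (PySem.Dict.empty, [])) rfl hnd0
  simp only [Nat.cast_zero] at hph2
  have hkey : ∀ i ∈ PySem.List.pyRange 0 (predicted.length : Int) 1,
      (((PySem.List.enumerate (first :: restC) 0).foldl
      (fun (s : PySem.Dict Int Int × List (Int × Int)) il =>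
        let hi := hiOf (first :: restC) il.1
        s.2.foldl (fun (t : PySem.Dict Int Int × List (Int × Int)) ip =>
          if il.2 < ip.2 ∧ ip.2 < hi then (t.1.insert ip.1 (il.1 + 1), t.2)
          else (t.1, t.2 ++ [ip])) (s.1, []))
      ((PySem.List.enumerate predicted 0).foldl
        (fun (s : PySem.Dict Int Int × List (Int × Int)) ip =>
          if ip.2 < first then (s.1.insert ip.1 0, s.2) else (s.1, s.2 ++ [ip]))
        (PySem.Dict.empty, [])))).1.get? i
        = ((classifyB ((first :: restC).zip (restC ++ [10000000000])) first) ∘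
            (fun j => PySem.List.pyGetD predicted j 0)) i := by
    intro i hi
    obtain ⟨h0, h1⟩ := PySem.List.mem_pyRange_one.mp hi
    have hlu : List.lookup i (PySem.List.enumerate predicted 0)
        = some (PySem.List.pyGetD predicted i 0) := by
      rw [lookup_enumerate predicted 0 i, if_pos ⟨h0, by omega⟩]
      simp only [sub_zero]
      rw [PySem.List.pyGetD_eq_getElem predicted 0 h0 h1]
      exact List.getElem?_eq_getElem (by omega)
    rw [hph2 i, hp2, lookup_filter _ _ hnodup_e i, hlu]
    show _ = classifyB ((first :: restC).zip (restC ++ [10000000000])) first (PySem.List.pyGetD predicted i 0)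
    by_cases hp : PySem.List.pyGetD predicted i 0 < first
    · simp [hp, hp1 i, hlu, classifyB]
    · simp [hp, hp1 i, hlu, classifyB, match_opt_id]
  calc cutoff_transform_alt (first :: restC) predicted
      = (PySem.List.pyRange 0 (predicted.length : Int) 1).foldl (fun acc i =>
          match (((PySem.List.enumerate (first :: restC) 0).foldl
      (fun (s : PySem.Dict Int Int × List (Int × Int)) il =>
        let hi := hiOf (first :: restC) il.1
        s.2.foldl (fun (t : PySem.Dict Int Int × List (Int × Int)) ip =>
          if il.2 < ip.2 ∧ ip.2 < hi then (t.1.insert ip.1 (il.1 + 1), t.2)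
          else (t.1, t.2 ++ [ip])) (s.1, []))
      ((PySem.List.enumerate predicted 0).foldl
        (fun (s : PySem.Dict Int Int × List (Int × Int)) ip =>
          if ip.2 < first then (s.1.insert ip.1 0, s.2) else (s.1, s.2 ++ [ip]))
        (PySem.Dict.empty, [])))).1.get? i with
          | some v => acc ++ [v]
          | none => acc) [] := rfl
    _ = [] ++ (PySem.List.pyRange 0 (predicted.length : Int) 1).filterMap
          (fun i => (((PySem.List.enumerate (first :: restC) 0).foldl
      (fun (s : PySem.Dict Int Int × List (Int × Int)) il =>
        let hi := hiOf (first :: restC) il.1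
        s.2.foldl (fun (t : PySem.Dict Int Int × List (Int × Int)) ip =>
          if il.2 < ip.2 ∧ ip.2 < hi then (t.1.insert ip.1 (il.1 + 1), t.2)
          else (t.1, t.2 ++ [ip])) (s.1, []))
      ((PySem.List.enumerate predicted 0).foldl
        (fun (s : PySem.Dict Int Int × List (Int × Int)) ip =>
          if ip.2 < first then (s.1.insert ip.1 0, s.2) else (s.1, s.2 ++ [ip]))
        (PySem.Dict.empty, [])))).1.get? i) :=
        foldl_opt_append _ _ _
    _ = (PySem.List.pyRange 0 (predicted.length : Int) 1).filterMap
          ((classifyB ((first :: restC).zip (restC ++ [10000000000])) first) ∘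
            (fun j => PySem.List.pyGetD predicted j 0)) := by
        rw [List.nil_append]
        exact List.filterMap_congr hkey
    _ = ((PySem.List.pyRange 0 (predicted.length : Int) 1).map
          (fun j => PySem.List.pyGetD predicted j 0)).filterMap
          (classifyB ((first :: restC).zip (restC ++ [10000000000])) first) :=
        List.filterMap_map.symm
    _ = predicted.filterMap (classifyB ((first :: restC).zip (restC ++ [10000000000])) first) := by
        rw [PySem.List.map_pyGetD_pyRange_zero' predicted 0]

-- ===== VERDICT =====
theorem cutoff_transform_spec : Claim_equal_cutoff_transform := by
  intro cutoffs predicted _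
  unfold Spec_cutoff_transform
  cases cutoffs with
  | nil =>
    rw [a_eq]
    simp [cutoff_transform_alt, innerA]
  | cons first restC =>
    rw [a_eq, alt_eq]
    apply List.filterMap_congr
    intro p _
    exact inner_eq_classify first restC p
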